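-- pv_equiv track=rewrite | github.com/jaivikppatel/ipl2026 | server/backfill_player_image_data.py | detect_mime
-- ===== SOURCE A (Python) =====
-- EXT_MIME = {
--     '.jpg':  'image/jpeg',
--     '.jpeg': 'image/jpeg',
--     '.png':  'image/png',
--     '.webp': 'image/webp',
--     '.gif':  'image/gif',
-- }
--
-- def detect_mime(url: str, content_type: str | None) -> str:
--     """Detect MIME type from Content-Type header, falling back to URL extension."""
--     if content_type:
--         mime = content_type.split(';')[0].strip().lower()
--         if mime.startswith('image/'):
--             return mime
--     # Fallback: check URL extension
--     lower_url = url.lower().split('?')[0]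
--     for ext, mime in EXT_MIME.items():
--         if lower_url.endswith(ext):
--             return mime
--     return 'image/jpeg'  # last resort
-- ===== SOURCE B (Python) =====
-- EXT_MIME = {
--     '.jpg':  'image/jpeg',
--     '.jpeg': 'image/jpeg',
--     '.png':  'image/png',
--     '.webp': 'image/webp',
--     '.gif':  'image/gif',
-- }
--
-- def _header_mime(content_type):
--     """Image MIME named by the Content-Type header, or None."""
--     if not content_type:
--         return None
--     semi = content_type.find(';')
--     head = content_type if semi == -1 else content_type[:semi]
--     mime = head.strip().lower()
--     return mime if mime.startswith('image/') else None
--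
-- def _ext_mime(url):
--     """MIME looked up from the URL extension; 'image/jpeg' as last resort."""
--     path = url.lower()
--     qm = path.find('?')
--     if qm != -1:
--         path = path[:qm]
--     idx = path.rfind('.')
--     if idx == -1:
--         return 'image/jpeg'
--     return EXT_MIME.get(path[idx:], 'image/jpeg')
--
-- def detect_mime(url, content_type):
--     """Detect MIME type from Content-Type header, falling back to URL extension."""
--     header = _header_mime(content_type)
--     return header if header is not None else _ext_mime(url)
-- ===== Notes on version B (the rewrite author's own statement) =====
-- stated objective: idiomatic
-- what changed: B is decomposed into an Option-returning header helper and an extension helper; it extracts the pre-';' head and pre-'?' path with find+slice instead of split, and replaces the endswith scan over EXT_MIME by one rfind of the last dot and a single dict lookup with a default.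
import Mathlib
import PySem

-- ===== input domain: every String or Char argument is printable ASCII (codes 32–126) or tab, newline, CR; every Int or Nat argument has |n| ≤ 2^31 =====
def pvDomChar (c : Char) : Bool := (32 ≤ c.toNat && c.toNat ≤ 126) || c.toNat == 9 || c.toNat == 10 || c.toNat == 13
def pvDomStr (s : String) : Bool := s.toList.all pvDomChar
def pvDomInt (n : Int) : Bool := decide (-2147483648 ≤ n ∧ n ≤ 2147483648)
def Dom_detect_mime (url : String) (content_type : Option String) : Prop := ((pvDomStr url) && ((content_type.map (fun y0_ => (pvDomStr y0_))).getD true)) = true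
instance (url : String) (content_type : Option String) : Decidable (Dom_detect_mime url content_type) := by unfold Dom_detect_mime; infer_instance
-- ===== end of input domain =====

-- B is re-decomposed: an Option-returning header helper plus an extension helper that use
-- find/rfind + slice and one table lookup instead of A's split()[0] heads and endswith scan
-- (idiomatic; same return value everywhere).

-- ===== PORT A =====
def pvEXT_MIME : PySem.Dict String String :=
  ⟨[(".jpg", "image/jpeg"), (".jpeg", "image/jpeg"), (".png", "image/png"),
    (".webp", "image/webp"), (".gif", "image/gif")]⟩

-- the `for ext, mime in EXT_MIME.items(): if lower_url.endswith(ext): return mime` loop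
def pvScanA (lower_url : String) : List (String × String) → String
  | [] => "image/jpeg"
  | (ext, mime) :: rest =>
      if PySem.Str.endswith lower_url ext then mime else pvScanA lower_url rest

def pvFallbackA (url : String) : String :=
  let lower_url := (((PySem.Str.split? (PySem.Str.lower url) "?").getD []).headD "")
  pvScanA lower_url pvEXT_MIME.items

def detect_mime (url : String) (content_type : Option String) : String :=
  match content_type with
  | some c =>
      if c ≠ "" then
        if PySem.Str.startswith (PySem.Str.lower (PySem.Str.strip (((PySem.Str.split? c ";").getD []).headD ""))) "image/" then
          PySem.Str.lower (PySem.Str.strip (((PySem.Str.split? c ";").getD []).headD ""))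
        else pvFallbackA url
      else pvFallbackA url
  | none => pvFallbackA url

-- ===== PORT B =====
-- `_header_mime`: the image MIME named by the Content-Type header, or none
def pvHeaderMimeB (content_type : Option String) : Option String :=
  match content_type with
  | none => none
  | some ct =>
      if ct = "" then none
      else
        let semi := PySem.Str.find ct ";"
        let head := if semi = -1 then ct else PySem.Str.slice ct none (some semi)
        let mime := PySem.Str.lower (PySem.Str.strip head)
        if PySem.Str.startswith mime "image/" then some mime else none

-- `_ext_mime`: MIME looked up from the URL extension; "image/jpeg" as last resort
def pvExtMimeB (url : String) : String :=
  let path0 := PySem.Str.lower url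
  let qm := PySem.Str.find path0 "?"
  let path := if qm = -1 then path0 else PySem.Str.slice path0 none (some qm)
  let idx := PySem.Str.rfind path "."
  if idx = -1 then "image/jpeg"
  else PySem.Dict.getD pvEXT_MIME (PySem.Str.slice path (some idx) none) "image/jpeg"

def detect_mime_alt (url : String) (content_type : Option String) : String :=
  match pvHeaderMimeB content_type with
  | some m => m
  | none => pvExtMimeB url

-- ===== PRECONDITION & SPEC =====
def Spec_detect_mime (url : String) (content_type : Option String) (out : String) : Prop := out = detect_mime_alt url content_type
instance (url : String) (content_type : Option String) (out : String) : Decidable (Spec_detect_mime url content_type out) := by unfold Spec_detect_mime; infer_instance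

-- ===== CLAIM (what is proved, stated in full; the proofs are below) =====
def Claim_equal_detect_mime : Prop := ∀ (url : String) (content_type : Option String), Dom_detect_mime url content_type → Spec_detect_mime url content_type (detect_mime url content_type)

-- ===== LEMMAS AND PROOFS =====

-- splitOn.go keeps the last element of a nonempty accumulator as the head of its result
theorem pvGoLast (sep : List Char) :
    ∀ fuel (s cur acc : List Char) (accs : List (List Char)),
      (PySem.Chars.splitOn.go sep fuel s cur (accs ++ [acc])).headD [] = acc := by
  intro fuel
  induction fuel with
  | zero =>
      intro s cur acc accs
      simp [PySem.Chars.splitOn.go]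
  | succ f ih =>
      intro s cur acc accs
      cases s with
      | nil => simp [PySem.Chars.splitOn.go]
      | cons c rest =>
          simp only [PySem.Chars.splitOn.go]
          by_cases hp : sep.isPrefixOf (c :: rest) = true
          · rw [if_pos hp]
            exact ih _ _ acc (cur.reverse :: accs)
          · rw [if_neg hp]
            exact ih _ _ acc accs

-- no occurrence of sep: the whole input becomes the single (head) piece
theorem pvGoNone (sep : List Char) :
    ∀ fuel (s cur : List Char), s.length < fuel →
      (∀ j, ¬ sep <+: s.drop j) →
      (PySem.Chars.splitOn.go sep fuel s cur []).headD [] = cur.reverse ++ s := by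
  intro fuel
  induction fuel with
  | zero => intro s cur h; omega
  | succ f ih =>
      intro s cur hlen hno
      cases s with
      | nil => simp [PySem.Chars.splitOn.go]
      | cons c rest =>
          simp only [PySem.Chars.splitOn.go]
          have hp : ¬ sep.isPrefixOf (c :: rest) = true := by
            rw [List.isPrefixOf_iff_prefix]
            simpa using hno 0
          rw [if_neg hp]
          have := ih rest (c :: cur) (by simpa using Nat.lt_of_succ_lt_succ hlen)
            (fun j => by simpa using hno (j + 1))
          rw [this]
          simp
-- first occurrence of sep at position k: the head piece is the first k characters
theorem pvGoFirst (sep : List Char) (hsep : sep ≠ []) :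
    ∀ fuel (s cur : List Char) (k : Nat), s.length < fuel →
      sep <+: s.drop k → (∀ i < k, ¬ sep <+: s.drop i) →
      (PySem.Chars.splitOn.go sep fuel s cur []).headD [] = cur.reverse ++ s.take k := by
  intro fuel
  induction fuel with
  | zero => intro s cur k h; omega
  | succ f ih =>
      intro s cur k hlen hocc hmin
      cases s with
      | nil =>
          exfalso
          rw [List.drop_nil] at hocc
          exact hsep (List.prefix_nil.mp hocc)
      | cons c rest =>
          simp only [PySem.Chars.splitOn.go]
          cases k with
          | zero =>
              have hp : sep.isPrefixOf (c :: rest) = true := by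
                rw [List.isPrefixOf_iff_prefix]; simpa using hocc
              rw [if_pos hp]
              have := pvGoLast sep f (List.drop sep.length (c :: rest)) [] cur.reverse []
              simpa using this
          | succ k =>
              have hp : ¬ sep.isPrefixOf (c :: rest) = true := by
                rw [List.isPrefixOf_iff_prefix]
                simpa using hmin 0 (Nat.succ_pos k)
              rw [if_neg hp]
              have := ih rest (c :: cur) k (by simpa using Nat.lt_of_succ_lt_succ hlen)
                (by simpa using hocc)
                (fun i hi => by simpa using hmin (i + 1) (by omega))
              rw [this]
              simp

-- head of Python's split(sep) = everything before the first occurrence of sep (find-based)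
theorem pvSplitHead (s sep : List Char) (hsep : sep ≠ []) :
    (PySem.Chars.splitOn s sep).headD [] =
      if PySem.Chars.find s sep = -1 then s
      else s.take (PySem.Chars.find s sep).toNat := by
  unfold PySem.Chars.splitOn
  by_cases h : PySem.Chars.find s sep = -1
  · rw [if_pos h]
    have hno : ¬ sep <:+: s := (PySem.Chars.find_eq_neg_one_iff s sep).mp h
    have hno' : ∀ j, ¬ sep <+: s.drop j := by
      intro j hj
      exact hno ((PySem.Chars.isIn_iff_infix sep s).mp
        ((PySem.Chars.exists_prefix_drop_iff_isIn sep s).mp ⟨j, hj⟩))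
    simpa using pvGoNone sep (s.length + 1) s [] (by omega) hno'
  · rw [if_neg h]
    have hnn : 0 ≤ PySem.Chars.find s sep := by
      have := PySem.Chars.neg_one_le_find s sep; omega
    obtain ⟨hocc, hmin⟩ := PySem.Chars.find_spec hnn
    simpa using pvGoFirst sep hsep (s.length + 1) s [] _ (by omega) hocc hmin

-- the same fact lifted to String, in the exact shapes A and B use
theorem pvSplitHeadStr (s sep : String) (hsep : sep.toList ≠ []) :
    ((PySem.Str.split? s sep).getD []).headD "" =
      (if PySem.Str.find s sep = -1 then s
       else PySem.Str.slice s none (some (PySem.Str.find s sep))) := by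
  have hsome : PySem.Str.split? s sep
      = some ((PySem.Chars.splitOn s.toList sep.toList).map String.ofList) := by
    unfold PySem.Str.split? PySem.Chars.split?
    simp [List.isEmpty_iff, hsep]
  rw [hsome]
  have hmap : (((PySem.Chars.splitOn s.toList sep.toList).map String.ofList).headD "")
      = String.ofList ((PySem.Chars.splitOn s.toList sep.toList).headD []) := by
    cases PySem.Chars.splitOn s.toList sep.toList with
    | nil => rfl
    | cons x xs => rfl
  rw [Option.getD_some, hmap, pvSplitHead s.toList sep.toList hsep]
  by_cases h : PySem.Chars.find s.toList sep.toList = -1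
  · rw [if_pos h, if_pos (by rw [PySem.Str.find_eq]; exact h)]
    apply String.toList_inj.mp
    simp
  · rw [if_neg h, if_neg (by rw [PySem.Str.find_eq]; exact h)]
    apply String.toList_inj.mp
    have hnn : 0 ≤ PySem.Chars.find s.toList sep.toList := by
      have := PySem.Chars.neg_one_le_find s.toList sep.toList; omega
    rw [String.toList_ofList, PySem.Str.toList_slice, PySem.Chars.slice_eq_listSlice,
        PySem.Str.find_eq, PySem.List.slice_to s.toList hnn]

-- rfind.go returns k when the pattern occurs at k and nowhere above k (up to j)
theorem pvGo_eq (s sub : List Char) (k : Nat) :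
    ∀ j : Nat, k ≤ j → sub <+: s.drop k →
      (∀ i : Nat, k < i → i ≤ j → ¬ sub <+: s.drop i) →
      PySem.Chars.rfind.go s sub j = (k : Int) := by
  intro j
  induction j with
  | zero =>
      intro hk h1 _
      interval_cases k
      simp only [PySem.Chars.rfind.go, List.drop_zero] at *
      simp [List.isPrefixOf_iff_prefix, h1]
  | succ j ih =>
      intro hk h1 h2
      by_cases hkj : k = j + 1
      · subst hkj
        simp [PySem.Chars.rfind.go, List.isPrefixOf_iff_prefix, h1]
      · have hk' : k ≤ j := by omega
        have hnp : ¬ sub <+: s.drop (j + 1) := h2 (j + 1) (by omega) (le_refl _)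
        simp only [PySem.Chars.rfind.go, List.isPrefixOf_iff_prefix]
        rw [if_neg (by simpa using hnp)]
        exact ih hk' h1 (fun i hi hij => h2 i hi (by omega))

-- when rfind.go does not return -1 it names a position where the pattern occurs
theorem pvGo_mem (s sub : List Char) :
    ∀ j : Nat, PySem.Chars.rfind.go s sub j ≠ -1 →
      ∃ k : Nat, PySem.Chars.rfind.go s sub j = (k : Int) ∧ k ≤ j ∧ sub <+: s.drop k := by
  intro j
  induction j with
  | zero =>
      intro h
      simp only [PySem.Chars.rfind.go] at h ⊢
      by_cases hp : sub.isPrefixOf s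
      · exact ⟨0, by simp [hp], le_refl _, by simpa using List.isPrefixOf_iff_prefix.mp hp⟩
      · simp [hp] at h
  | succ j ih =>
      intro h
      simp only [PySem.Chars.rfind.go] at h ⊢
      by_cases hp : sub.isPrefixOf (s.drop (j + 1))
      · exact ⟨j + 1, by simp [hp], le_refl _, List.isPrefixOf_iff_prefix.mp hp⟩
      · rw [if_neg (by simpa using hp)] at h ⊢
        obtain ⟨k, hk1, hk2, hk3⟩ := ih h
        exact ⟨k, hk1, by omega, hk3⟩

-- the last dot of `p ++ '.'::t` with no dot in t is at position p.length
theorem pvRfind_dot (p t : List Char) (ht : '.' ∉ t) :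
    PySem.Chars.rfind (p ++ '.' :: t) ['.'] = (p.length : Int) := by
  unfold PySem.Chars.rfind
  apply pvGo_eq
  · simp
  · rw [List.drop_left]
    exact ⟨t, rfl⟩
  · intro i hi hij hpre
    obtain ⟨m, hm⟩ : ∃ m, i = p.length + (m + 1) := ⟨i - p.length - 1, by omega⟩
    have hdrop : (p ++ '.' :: t).drop i = t.drop m := by
      subst hm
      rw [List.drop_append]
      simp
    rw [hdrop] at hpre
    have : '.' ∈ t.drop m := hpre.subset (by simp)
    exact ht (List.drop_subset m t this)

-- if the lowered path ends with '.'::t (no dot in t), B's rfind+slice extracts exactly '.'::t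
theorem pvPos (path : String) (t : List Char) (ht : '.' ∉ t) (h : ('.' :: t) <:+ path.toList) :
    PySem.Str.rfind path "." ≠ -1 ∧
    (PySem.Str.slice path (some (PySem.Str.rfind path ".")) none).toList = '.' :: t := by
  obtain ⟨p, hp⟩ := h
  have hr : PySem.Str.rfind path "." = (p.length : Int) := by
    rw [PySem.Str.rfind_eq]
    have hdot : ".".toList = ['.'] := by decide
    rw [hdot, ← hp]
    exact pvRfind_dot p t ht
  refine ⟨by rw [hr]; omega, ?_⟩
  rw [hr, PySem.Str.toList_slice, PySem.Chars.slice_eq_listSlice,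
      PySem.List.slice_from _ (Int.natCast_nonneg _), Int.toNat_natCast, ← hp, List.drop_left]

-- core: the endswith-scan over the table equals rfind + one lookup, for any string
theorem pvScan_eq_lookup (path : String) :
    pvScanA path pvEXT_MIME.items =
      (if PySem.Str.rfind path "." = -1 then "image/jpeg"
       else PySem.Dict.getD pvEXT_MIME (PySem.Str.slice path (some (PySem.Str.rfind path ".")) none) "image/jpeg") := by
  have ewT : ∀ l : List Char, l <:+ path.toList →
      PySem.Chars.endswith path.toList l = true :=
    fun l h => (PySem.Chars.endswith_iff _ _).mpr h
  have ewF : ∀ l : List Char, ¬ l <:+ path.toList →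
      PySem.Chars.endswith path.toList l = false := by
    intro l h
    rw [← Bool.not_eq_true, PySem.Chars.endswith_iff]
    exact h
  by_cases h1 : ['.','j','p','g'] <:+ path.toList
  · obtain ⟨hr, hk⟩ := pvPos path ['j','p','g'] (by decide) h1
    have hkey : PySem.Str.slice path (some (PySem.Str.rfind path ".")) none = ".jpg" :=
      String.toList_inj.mp (by rw [hk]; decide)
    rw [if_neg hr, hkey]
    simp [pvScanA, pvEXT_MIME, ewT _ h1, PySem.Dict.getD, PySem.Dict.get?]
  by_cases h2 : ['.','j','p','e','g'] <:+ path.toList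
  · obtain ⟨hr, hk⟩ := pvPos path ['j','p','e','g'] (by decide) h2
    have hkey : PySem.Str.slice path (some (PySem.Str.rfind path ".")) none = ".jpeg" :=
      String.toList_inj.mp (by rw [hk]; decide)
    rw [if_neg hr, hkey]
    simp [pvScanA, pvEXT_MIME, ewF _ h1, ewT _ h2, PySem.Dict.getD, PySem.Dict.get?]
  by_cases h3 : ['.','p','n','g'] <:+ path.toList
  · obtain ⟨hr, hk⟩ := pvPos path ['p','n','g'] (by decide) h3
    have hkey : PySem.Str.slice path (some (PySem.Str.rfind path ".")) none = ".png" :=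
      String.toList_inj.mp (by rw [hk]; decide)
    rw [if_neg hr, hkey]
    simp [pvScanA, pvEXT_MIME, ewF _ h1, ewF _ h2, ewT _ h3, PySem.Dict.getD, PySem.Dict.get?]
  by_cases h4 : ['.','w','e','b','p'] <:+ path.toList
  · obtain ⟨hr, hk⟩ := pvPos path ['w','e','b','p'] (by decide) h4
    have hkey : PySem.Str.slice path (some (PySem.Str.rfind path ".")) none = ".webp" :=
      String.toList_inj.mp (by rw [hk]; decide)
    rw [if_neg hr, hkey]
    simp [pvScanA, pvEXT_MIME, ewF _ h1, ewF _ h2, ewF _ h3, ewT _ h4, PySem.Dict.getD, PySem.Dict.get?]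
  by_cases h5 : ['.','g','i','f'] <:+ path.toList
  · obtain ⟨hr, hk⟩ := pvPos path ['g','i','f'] (by decide) h5
    have hkey : PySem.Str.slice path (some (PySem.Str.rfind path ".")) none = ".gif" :=
      String.toList_inj.mp (by rw [hk]; decide)
    rw [if_neg hr, hkey]
    simp [pvScanA, pvEXT_MIME, ewF _ h1, ewF _ h2, ewF _ h3, ewF _ h4, ewT _ h5, PySem.Dict.getD, PySem.Dict.get?]
  -- no table extension is a suffix: A falls through to the default
  have hA : pvScanA path pvEXT_MIME.items = "image/jpeg" := by
    simp [pvScanA, pvEXT_MIME, ewF _ h1, ewF _ h2, ewF _ h3, ewF _ h4, ewF _ h5]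
  rw [hA]
  by_cases hr : PySem.Str.rfind path "." = -1
  · rw [if_pos hr]
  · -- the suffix after the last dot matches no table key
    rw [if_neg hr]
    have hgo : PySem.Chars.rfind.go path.toList ['.'] path.toList.length ≠ -1 := by
      rw [PySem.Str.rfind_eq] at hr
      have hdot : ".".toList = ['.'] := by decide
      rw [hdot] at hr
      simpa [PySem.Chars.rfind] using hr
    obtain ⟨k, hk1, _, _⟩ := pvGo_mem path.toList ['.'] path.toList.length hgo
    have hrk : PySem.Str.rfind path "." = (k : Int) := by
      rw [PySem.Str.rfind_eq]
      have hdot : ".".toList = ['.'] := by decide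
      rw [hdot]
      simpa [PySem.Chars.rfind] using hk1
    have hkey : (PySem.Str.slice path (some (PySem.Str.rfind path ".")) none).toList
        = path.toList.drop k := by
      rw [hrk, PySem.Str.toList_slice, PySem.Chars.slice_eq_listSlice,
          PySem.List.slice_from _ (Int.natCast_nonneg _), Int.toNat_natCast]
    have hsuf : (PySem.Str.slice path (some (PySem.Str.rfind path ".")) none).toList <:+ path.toList := by
      rw [hkey]; exact List.drop_suffix k path.toList
    have hne : ∀ e : String, ¬ e.toList <:+ path.toList →
        (PySem.Str.slice path (some (PySem.Str.rfind path ".")) none) ≠ e := by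
      intro e hno heq
      exact hno (by rw [← heq]; exact hsuf)
    rw [hrk] at hne ⊢
    have n1 : ((".jpg" : String) == PySem.Str.slice path (some ((k : Int))) none) = false :=
      beq_eq_false_iff_ne.mpr (Ne.symm (hne ".jpg" (by simpa using h1)))
    have n2 : ((".jpeg" : String) == PySem.Str.slice path (some ((k : Int))) none) = false :=
      beq_eq_false_iff_ne.mpr (Ne.symm (hne ".jpeg" (by simpa using h2)))
    have n3 : ((".png" : String) == PySem.Str.slice path (some ((k : Int))) none) = false :=
      beq_eq_false_iff_ne.mpr (Ne.symm (hne ".png" (by simpa using h3)))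
    have n4 : ((".webp" : String) == PySem.Str.slice path (some ((k : Int))) none) = false :=
      beq_eq_false_iff_ne.mpr (Ne.symm (hne ".webp" (by simpa using h4)))
    have n5 : ((".gif" : String) == PySem.Str.slice path (some ((k : Int))) none) = false :=
      beq_eq_false_iff_ne.mpr (Ne.symm (hne ".gif" (by simpa using h5)))
    simp [pvEXT_MIME, PySem.Dict.getD, PySem.Dict.get?, List.find?, n1, n2, n3, n4, n5]

-- A's fallback (head of split + endswith scan) = B's `_ext_mime` (find/rfind + slice + lookup)
theorem pvFallback_eq (url : String) : pvFallbackA url = pvExtMimeB url := by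
  unfold pvFallbackA pvExtMimeB
  have hq : ("?" : String).toList ≠ [] := by decide
  rw [pvSplitHeadStr (PySem.Str.lower url) "?" hq, pvScan_eq_lookup]

-- ===== VERDICT (by name: the statement is the Claim_ definition above) =====
theorem detect_mime_spec : Claim_equal_detect_mime := by
  intro url content_type _
  unfold Spec_detect_mime detect_mime detect_mime_alt pvHeaderMimeB
  cases content_type with
  | none => exact pvFallback_eq url
  | some c =>
      dsimp only
      by_cases hc : c = ""
      · rw [if_neg (not_not_intro hc), if_pos hc]
        exact pvFallback_eq url
      · rw [if_pos hc, if_neg hc]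
        have hs : (";" : String).toList ≠ [] := by decide
        rw [pvSplitHeadStr c ";" hs]
        by_cases hst : PySem.Str.startswith (PySem.Str.lower (PySem.Str.strip
            (if PySem.Str.find c ";" = -1 then c
             else PySem.Str.slice c none (some (PySem.Str.find c ";"))))) "image/" = true
        · rw [if_pos hst, if_pos hst]
        · rw [if_neg hst, if_neg hst]
          exact pvFallback_eq url
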